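-- pv_equiv track=rewrite | github.com/alexsocha/mipsplusplus | mipsplusplus/parser.py | isTopLevel
-- ===== SOURCE A (Python) =====
-- def isInBrackets(string, idx, b1='(', b2=')'):
--   bracketTeir = 0
--   for i, ch in enumerate(string):
--     if ch == b1: bracketTeir += 1
--     if ch == b2: bracketTeir -= 1
--     if i == idx: return bracketTeir > 0
--
-- def isTopLevel(string, idx, b1='(', b2=')'):
--   if isInBrackets(string, idx, '(', ')'): return False
--   if isInBrackets(string, idx, '[', ']'): return False
--   isSingleQuote = False
--   isDoubleQuote = False
--   for i, ch in enumerate(string):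
--     if ch == '\'': isSingleQuote = not isSingleQuote
--     if ch == '"': isDoubleQuote = not isDoubleQuote
--     if i == idx: return not isSingleQuote and not isDoubleQuote
-- ===== SOURCE B (Python) =====
-- def isTopLevel(string, idx, b1='(', b2=')'):
--   roundTier = 0
--   squareTier = 0
--   inSingle = False
--   inDouble = False
--   for i, ch in enumerate(string):
--     if ch == '(': roundTier += 1
--     if ch == ')': roundTier -= 1
--     if ch == '[': squareTier += 1
--     if ch == ']': squareTier -= 1
--     if ch == '\'': inSingle = not inSingle
--     if ch == '"': inDouble = not inDouble
--     if i == idx: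
--       return roundTier <= 0 and squareTier <= 0 and not inSingle and not inDouble
-- ===== Notes on version B (the rewrite author's own statement) =====
-- stated objective: simpler
-- what changed: One combined pass maintaining two bracket counters and two quote toggles replaces A's three separate scans of the string (two via the isInBrackets helper plus a quote loop).
-- outside the precondition, e.g. on isTopLevel('ab', 5, '(', ')'): A returns None, B returns None
import Mathlib
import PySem

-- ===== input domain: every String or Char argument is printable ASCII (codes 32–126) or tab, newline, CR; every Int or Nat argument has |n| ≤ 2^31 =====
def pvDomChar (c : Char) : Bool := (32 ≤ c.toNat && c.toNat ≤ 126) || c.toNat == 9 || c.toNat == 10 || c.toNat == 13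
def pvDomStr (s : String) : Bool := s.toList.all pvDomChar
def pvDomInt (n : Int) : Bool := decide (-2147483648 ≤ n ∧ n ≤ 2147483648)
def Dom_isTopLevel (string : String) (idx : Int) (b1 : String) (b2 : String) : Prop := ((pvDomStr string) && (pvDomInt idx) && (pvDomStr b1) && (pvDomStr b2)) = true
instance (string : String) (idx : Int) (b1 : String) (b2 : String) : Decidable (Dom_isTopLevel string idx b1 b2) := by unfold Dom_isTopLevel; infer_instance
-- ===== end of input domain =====

-- B replaces A's three sequential scans (two isInBrackets calls plus a quote loop) with one
-- combined pass maintaining both bracket counters and both quote toggles (objective: simpler).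
-- Python A returns None (no Bool) when idx is never reached by the loop; Pre_ excludes that.

-- ===== PORT A =====
-- helper isInBrackets: loop over the characters with index i and accumulator bracketTeir;
-- returns none when the loop falls off the end (Python's implicit None).
def isInBracketsA (b1 b2 : Char) (idx : Int) : List Char → Int → Int → Option Bool
  | [], _, _ => none
  | ch :: rest, i, tier =>
    let tier := if ch = b1 then tier + 1 else tier
    let tier := if ch = b2 then tier - 1 else tier
    if i = idx then some (decide (tier > 0)) else isInBracketsA b1 b2 idx rest (i + 1) tier

-- the quote loop of isTopLevel, same shape
def quoteLoopA (idx : Int) : List Char → Int → Bool → Bool → Option Bool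
  | [], _, _, _ => none
  | ch :: rest, i, sq, dq =>
    let sq := if ch = '\'' then !sq else sq
    let dq := if ch = '"' then !dq else dq
    if i = idx then some (!sq && !dq) else quoteLoopA idx rest (i + 1) sq dq

def isTopLevel (string : String) (idx : Int) (b1 : String) (b2 : String) : Bool :=
  -- Python: `if isInBrackets(...): return False` — a None result is falsy
  if (isInBracketsA '(' ')' idx string.toList 0 0).getD false then false
  else if (isInBracketsA '[' ']' idx string.toList 0 0).getD false then false
  else (quoteLoopA idx string.toList 0 false false).getD false

-- ===== PORT B =====
-- single combined pass: two counters, two toggles, elif chain, answer at i = idx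
def goB (idx : Int) : List Char → Int → Int → Int → Bool → Bool → Option Bool
  | [], _, _, _, _, _ => none
  | ch :: rest, i, r, s, sq, dq =>
    let r := if ch = '(' then r + 1 else r
    let r := if ch = ')' then r - 1 else r
    let s := if ch = '[' then s + 1 else s
    let s := if ch = ']' then s - 1 else s
    let sq := if ch = '\'' then !sq else sq
    let dq := if ch = '"' then !dq else dq
    if i = idx then some (decide (r ≤ 0) && decide (s ≤ 0) && !sq && !dq)
    else goB idx rest (i + 1) r s sq dq

def isTopLevel_alt (string : String) (idx : Int) (b1 : String) (b2 : String) : Bool :=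
  (goB idx string.toList 0 0 0 false false).getD false

-- ===== PRECONDITION & SPEC =====
-- Pre_ excludes exactly the inputs on which Python A returns None instead of a Bool:
-- idx not an index reached by enumerate(string), i.e. idx < 0 or idx ≥ len(string).
def Pre_isTopLevel (string : String) (idx : Int) (b1 : String) (b2 : String) : Prop :=
  0 ≤ idx ∧ idx < (string.toList.length : Int)
instance (string : String) (idx : Int) (b1 : String) (b2 : String) : Decidable (Pre_isTopLevel string idx b1 b2) := by unfold Pre_isTopLevel; infer_instance

def pvWitness_isTopLevel : String × Int × String × String := ("a('b)[c]", 3, "(", ")")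

def Spec_isTopLevel (string : String) (idx : Int) (b1 : String) (b2 : String) (out : Bool) : Prop := out = isTopLevel_alt string idx b1 b2
instance (string : String) (idx : Int) (b1 : String) (b2 : String) (out : Bool) : Decidable (Spec_isTopLevel string idx b1 b2 out) := by unfold Spec_isTopLevel; infer_instance

-- ===== CLAIM (what is proved, stated in full; the proofs are below) =====
def Claim_equal_isTopLevel : Prop := ∀ (string : String) (idx : Int) (b1 : String) (b2 : String), Dom_isTopLevel string idx b1 b2 → Pre_isTopLevel string idx b1 b2 → Spec_isTopLevel string idx b1 b2 (isTopLevel string idx b1 b2)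

-- ===== LEMMAS AND PROOFS =====

lemma decide_le_zero (x : Int) : decide (x ≤ 0) = !decide (x > 0) := by
  by_cases h : x ≤ 0 <;> simp [h] <;> omega

-- the combined pass computes exactly the combination of A's three scans
lemma goB_eq_combine : ∀ (l : List Char) (idx i r s : Int) (sq dq : Bool),
    goB idx l i r s sq dq =
      match isInBracketsA '(' ')' idx l i r, isInBracketsA '[' ']' idx l i s,
            quoteLoopA idx l i sq dq with
      | some a, some b, some q => some (!a && !b && q)
      | _, _, _ => none := by
  intro l
  induction l with
  | nil => intro idx i r s sq dq; simp [goB, isInBracketsA, quoteLoopA]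
  | cons ch rest ih =>
    intro idx i r s sq dq
    simp only [goB, isInBracketsA, quoteLoopA]
    by_cases hi : i = idx
    · simp [hi, decide_le_zero, Bool.and_assoc]
    · simp only [hi, if_false]
      exact ih idx (i + 1) _ _ _ _

-- A's three scans all return some when idx lies in the scanned range
lemma isInBracketsA_isSome : ∀ (l : List Char) (b1 b2 : Char) (idx i t : Int),
    i ≤ idx → idx < i + (l.length : Int) →
    (isInBracketsA b1 b2 idx l i t).isSome := by
  intro l
  induction l with
  | nil => intro _ _ _ i _ h1 h2; simp at h2; omega
  | cons ch rest ih =>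
    intro b1 b2 idx i t h1 h2
    simp only [isInBracketsA]
    by_cases hi : i = idx
    · simp [hi]
    · simp only [hi, if_false]
      apply ih
      · omega
      · simp at h2; omega

lemma quoteLoopA_isSome : ∀ (l : List Char) (idx i : Int) (sq dq : Bool),
    i ≤ idx → idx < i + (l.length : Int) →
    (quoteLoopA idx l i sq dq).isSome := by
  intro l
  induction l with
  | nil => intro _ i _ _ h1 h2; simp at h2; omega
  | cons ch rest ih =>
    intro idx i sq dq h1 h2
    simp only [quoteLoopA]
    by_cases hi : i = idx
    · simp [hi]
    · simp only [hi, if_false]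
      apply ih
      · omega
      · simp at h2; omega

-- ===== VERDICT (by name: the statement is the Claim_ definition above) =====
theorem isTopLevel_spec : Claim_equal_isTopLevel := by
  intro string idx b1 b2 _ hpre
  obtain ⟨h0, hlen⟩ := hpre
  unfold Spec_isTopLevel isTopLevel isTopLevel_alt
  have ha := isInBracketsA_isSome string.toList '(' ')' idx 0 0 h0 (by omega)
  have hb := isInBracketsA_isSome string.toList '[' ']' idx 0 0 h0 (by omega)
  have hq := quoteLoopA_isSome string.toList idx 0 false false h0 (by omega)
  rw [goB_eq_combine]
  obtain ⟨a, hA⟩ := Option.isSome_iff_exists.mp ha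
  obtain ⟨b, hB⟩ := Option.isSome_iff_exists.mp hb
  obtain ⟨q, hQ⟩ := Option.isSome_iff_exists.mp hq
  rw [hA, hB, hQ]
  cases a <;> cases b <;> cases q <;> simp
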